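-- pv_equiv track=rewrite | github.com/si-medbif/FastFASTQTransfer | huffman.py | merge_frequency_dict
-- ===== SOURCE A (Python) =====
-- def merge_frequency_dict(frequency_dicts) :
--     result_dict = frequency_dicts[0].copy()
--
--     # There is only one record input
--     if len(frequency_dicts) == 1 :
--         return result_dict
--
--     for current_dict in frequency_dicts[1:] :
--         for key in current_dict.keys() :
--             if key not in result_dict :
--                 result_dict[key] = 0
--             result_dict[key] += current_dict[key]
--
--     return result_dict
-- ===== SOURCE B (Python) =====
-- def merge_frequency_dict(frequency_dicts):
--     # key-first traversal: union of keys in first-appearance order, then sum per key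
--     keys = dict.fromkeys(key for d in frequency_dicts for key in d)
--     return {key: sum(d.get(key, 0) for d in frequency_dicts) for key in keys}
-- ===== Notes on version B (the rewrite author's own statement) =====
-- stated objective: alternative
-- what changed: Instead of copying the first dict and accumulating the remaining dicts entry-by-entry into it, B first builds the ordered union of all keys and then computes each key's total with one sum over all dicts (key-first instead of dict-first traversal).
import Mathlib
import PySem

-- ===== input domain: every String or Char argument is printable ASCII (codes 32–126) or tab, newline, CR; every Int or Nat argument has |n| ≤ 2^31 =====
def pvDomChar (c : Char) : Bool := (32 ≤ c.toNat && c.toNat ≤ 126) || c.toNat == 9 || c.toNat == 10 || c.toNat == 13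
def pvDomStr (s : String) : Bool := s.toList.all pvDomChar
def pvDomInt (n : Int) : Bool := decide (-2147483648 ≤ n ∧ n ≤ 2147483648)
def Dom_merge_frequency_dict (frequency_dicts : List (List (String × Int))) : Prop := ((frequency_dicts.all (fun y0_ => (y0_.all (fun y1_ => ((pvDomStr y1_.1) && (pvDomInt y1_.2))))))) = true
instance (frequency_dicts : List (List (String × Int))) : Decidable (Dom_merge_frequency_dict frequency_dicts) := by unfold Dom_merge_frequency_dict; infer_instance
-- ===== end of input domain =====

-- B merges the frequency dicts key-first (ordered union of keys, then one sum per key)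
-- instead of A's dict-by-dict accumulation into a copy of the first dict; equal values
-- and key order on every input Pre_ admits.

-- ===== PORT A =====
def merge_frequency_dict (frequency_dicts : List (List (String × Int))) : List (String × Int) :=
  match frequency_dicts with
  | [] => []   -- Python raises IndexError on frequency_dicts[0]; excluded by Pre_
  | d0 :: rest =>
    -- result_dict = frequency_dicts[0].copy()
    let result := PySem.Dict.mk d0
    -- if len(frequency_dicts) == 1: return result_dict
    if frequency_dicts.length = 1 then result.items
    else
      -- for current_dict in frequency_dicts[1:]: for key in current_dict.keys(): …
      (rest.foldl (fun res cur =>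
          ((PySem.Dict.mk cur).keys).foldl (fun res key =>
            let res1 := if res.contains key then res else res.insert key 0
            res1.modify key 0 (fun v => v + (PySem.Dict.mk cur).getD key 0)) res)
        result).items

-- ===== PORT B =====
def merge_frequency_dict_alt (frequency_dicts : List (List (String × Int))) : List (String × Int) :=
  -- keys = dict.fromkeys(key for d in frequency_dicts for key in d)
  let keys := PySem.List.dedup (frequency_dicts.flatMap (fun d => (PySem.Dict.mk d).keys))
  -- {key: sum(d.get(key, 0) for d in frequency_dicts) for key in keys}
  keys.map (fun key => (key, (frequency_dicts.map (fun d => (PySem.Dict.mk d).getD key 0)).sum))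

-- ===== PRECONDITION & SPEC =====
-- Pre_ excludes the empty list (A raises IndexError) and association lists with a duplicated
-- key inside one dict, which cannot arise from a Python dict argument.
def Pre_merge_frequency_dict (frequency_dicts : List (List (String × Int))) : Prop :=
  frequency_dicts ≠ [] ∧ ∀ d ∈ frequency_dicts, (d.map Prod.fst).Nodup
instance (frequency_dicts : List (List (String × Int))) : Decidable (Pre_merge_frequency_dict frequency_dicts) := by unfold Pre_merge_frequency_dict; infer_instance

def pvWitness_merge_frequency_dict : (List (List (String × Int))) :=
  [[("a", 1)], [("a", 2), ("b", 3)]]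

def Spec_merge_frequency_dict (frequency_dicts : List (List (String × Int))) (out : List (String × Int)) : Prop := out = merge_frequency_dict_alt frequency_dicts
instance (frequency_dicts : List (List (String × Int))) (out : List (String × Int)) : Decidable (Spec_merge_frequency_dict frequency_dicts out) := by unfold Spec_merge_frequency_dict; infer_instance

-- ===== CLAIM (what is proved, stated in full; the proofs are below) =====
def Claim_equal_merge_frequency_dict : Prop := ∀ (frequency_dicts : List (List (String × Int))), Dom_merge_frequency_dict frequency_dicts → Pre_merge_frequency_dict frequency_dicts → Spec_merge_frequency_dict frequency_dicts (merge_frequency_dict frequency_dicts)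

-- ===== LEMMAS AND PROOFS =====

-- total weight a pair list contributes to key k
def sumAt (ps : List (String × Int)) (k : String) : Int :=
  ((ps.filter (fun p => p.1 == k)).map Prod.snd).sum

theorem sumAt_nil (k : String) : sumAt [] k = 0 := rfl

theorem sumAt_cons (k0 : String) (v : Int) (t : List (String × Int)) (k : String) :
    sumAt ((k0, v) :: t) k = if k0 = k then v + sumAt t k else sumAt t k := by
  simp only [sumAt, List.filter_cons]
  by_cases h : k0 = k <;> simp [h]

theorem sumAt_of_not_mem (t : List (String × Int)) (k : String)
    (h : k ∉ t.map Prod.fst) : sumAt t k = 0 := by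
  induction t with
  | nil => rfl
  | cons p t ih =>
    obtain ⟨k0, v⟩ := p
    simp only [List.map_cons, List.mem_cons] at h
    push Not at h
    rw [sumAt_cons, if_neg (fun he => h.1 he.symm), ih h.2]

-- the canonical accumulation step ('result_dict[key] += v' with default 0)
def step (res : PySem.Dict String Int) (p : String × Int) : PySem.Dict String Int :=
  res.modify p.1 0 (fun v => v + p.2)

-- A's guarded update ('if key not in result: result[key] = 0; result[key] += c') IS the canonical step
theorem guarded_step_eq (res : PySem.Dict String Int) (key : String) (c : Int) :
    (if res.contains key then res else res.insert key 0).modify key 0 (fun v => v + c)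
      = res.modify key 0 (fun v => v + c) := by
  by_cases h : res.contains key = true
  · rw [if_pos h]
  · rw [if_neg h]
    simp only [PySem.Dict.modify, PySem.Dict.getD_insert_self,
      PySem.Dict.insert_insert_self,
      PySem.Dict.getD_of_not_contains res 0 (Bool.eq_false_iff.mpr h)]

theorem keys_step (res : PySem.Dict String Int) (p : String × Int) :
    (step res p).keys = PySem.Set.add res.keys p.1 := by
  simp only [step, PySem.Dict.modify, PySem.Set.add]
  by_cases hc : res.contains p.1 = true
  · rw [PySem.Dict.keys_insert_of_contains _ _ hc, if_pos]
    rw [PySem.Dict.contains_eq_decide_mem_keys] at hc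
    simpa [List.contains_iff_mem] using hc
  · replace hc := Bool.eq_false_iff.mpr hc
    rw [PySem.Dict.keys_insert_of_not_contains _ _ hc, if_neg]
    rw [PySem.Dict.contains_eq_decide_mem_keys] at hc
    simpa [List.contains_iff_mem] using hc

theorem nodup_keys_step (res : PySem.Dict String Int) (p : String × Int)
    (h : res.keys.Nodup) : (step res p).keys.Nodup :=
  PySem.Dict.nodup_keys_insert _ _ _ h

-- master characterisation of the accumulation loop
theorem foldl_step_items (ps : List (String × Int)) :
    ∀ (d : PySem.Dict String Int), d.keys.Nodup →
    (ps.foldl step d).items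
      = (PySem.Set.update d.keys (ps.map Prod.fst)).map
          (fun k => (k, d.getD k 0 + sumAt ps k)) := by
  induction ps with
  | nil =>
    intro d hd
    simp only [List.foldl_nil, List.map_nil, PySem.Set.update, sumAt_nil, add_zero]
    exact PySem.Dict.items_eq_map_keys d hd 0
  | cons p t ih =>
    intro d hd
    obtain ⟨k, v⟩ := p
    rw [List.foldl_cons, ih (step d (k, v)) (nodup_keys_step d (k, v) hd),
      keys_step d (k, v)]
    have hupd : PySem.Set.update (PySem.Set.add d.keys k) (t.map Prod.fst)
        = PySem.Set.update d.keys (((k, v) :: t).map Prod.fst) := rfl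
    rw [hupd]
    apply List.map_congr_left
    intro k' _
    have hg : (step d (k, v)).getD k' 0
        = if k' = k then (d.getD k 0 + v) else d.getD k' 0 :=
      PySem.Dict.getD_modify d k k' 0 (fun w => w + v)
    rw [hg, sumAt_cons]
    by_cases hk : k' = k
    · subst hk; simp; ring
    · rw [if_neg hk, if_neg (fun h => hk h.symm)]

theorem map_sumAt_self (d : List (String × Int)) (h : (d.map Prod.fst).Nodup) :
    (d.map Prod.fst).map (fun k => (k, sumAt d k)) = d := by
  induction d with
  | nil => rfl
  | cons p t ih =>
    obtain ⟨k, v⟩ := p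
    simp only [List.map_cons, List.nodup_cons] at h ⊢
    have hhd : sumAt ((k, v) :: t) k = v := by
      rw [sumAt_cons, if_pos rfl, sumAt_of_not_mem t k h.1, add_zero]
    have htl : List.map (fun k' => (k', sumAt ((k, v) :: t) k')) (t.map Prod.fst)
        = List.map (fun k' => (k', sumAt t k')) (t.map Prod.fst) := by
      apply List.map_congr_left
      intro k' hk'
      rw [sumAt_cons, if_neg]
      intro he; exact h.1 (he ▸ hk')
    rw [hhd, htl, ih h.2]

-- building the first dict IS folding the canonical step from the empty dict
theorem mk_eq_foldl_step (d0 : List (String × Int)) (h : (d0.map Prod.fst).Nodup) :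
    d0.foldl step PySem.Dict.empty = PySem.Dict.mk d0 := by
  apply PySem.Dict.ext
  rw [foldl_step_items d0 PySem.Dict.empty (by simp [pysem])]
  have hk : PySem.Set.update (PySem.Dict.empty (κ := String) (ν := Int)).keys (d0.map Prod.fst)
      = PySem.Set.ofList (d0.map Prod.fst) := rfl
  rw [hk, PySem.Set.ofList_eq_self_of_nodup _ h]
  have : ((PySem.Dict.empty (κ := String) (ν := Int)).getD · 0) = fun _ => 0 := by
    funext k; simp [pysem]
  calc (d0.map Prod.fst).map (fun k => (k, (PySem.Dict.empty).getD k 0 + sumAt d0 k))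
      = (d0.map Prod.fst).map (fun k => (k, sumAt d0 k)) := by
        apply List.map_congr_left; intro k _; simp [pysem]
    _ = d0 := map_sumAt_self d0 h
    _ = (PySem.Dict.mk d0).items := rfl

-- a single nodup-keyed dict looked up at k contributes exactly sumAt
theorem getD_eq_sumAt (d : List (String × Int)) (h : (d.map Prod.fst).Nodup) (k : String) :
    (PySem.Dict.mk d).getD k 0 = sumAt d k := by
  induction d with
  | nil => rfl
  | cons p t ih =>
    obtain ⟨k0, v⟩ := p
    simp only [List.map_cons, List.nodup_cons] at h
    rw [PySem.Dict.getD_eq_get?_getD, PySem.Dict.get?_mk_cons, sumAt_cons]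
    by_cases he : k0 = k
    · subst he
      rw [if_pos rfl, if_pos (by simp), sumAt_of_not_mem t k0 h.1, add_zero]; rfl
    · rw [if_neg he, if_neg (by simpa using he), ← PySem.Dict.getD_eq_get?_getD, ih h.2]

theorem sumAt_append (a b : List (String × Int)) (k : String) :
    sumAt (a ++ b) k = sumAt a k + sumAt b k := by
  simp [sumAt, List.filter_append]

theorem sumAt_flatten (L : List (List (String × Int))) (k : String) :
    sumAt L.flatten k = (L.map (fun d => sumAt d k)).sum := by
  induction L with
  | nil => rfl
  | cons d L ih =>
    rw [List.flatten_cons, List.map_cons, List.sum_cons, sumAt_append, ih]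

-- ===== VERDICT (by name: the statement is the Claim_ definition above) =====
theorem merge_frequency_dict_spec : Claim_equal_merge_frequency_dict := by
  intro fds _ hpre
  obtain ⟨hne, hnd⟩ := hpre
  unfold Spec_merge_frequency_dict
  cases fds with
  | nil => exact absurd rfl hne
  | cons d0 rest =>
    have hd0 : (d0.map Prod.fst).Nodup := hnd d0 (List.mem_cons_self ..)
    -- A's two branches both equal the accumulation fold
    have hA : merge_frequency_dict (d0 :: rest)
        = ((d0 ++ rest.flatten).foldl step PySem.Dict.empty).items := by
      have hcore : ∀ r : List (List (String × Int)), (∀ d ∈ r, (d.map Prod.fst).Nodup) →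
          (r.foldl (fun res cur =>
            ((PySem.Dict.mk cur).keys).foldl (fun res key =>
              let res1 := if res.contains key then res else res.insert key 0
              res1.modify key 0 (fun v => v + (PySem.Dict.mk cur).getD key 0)) res)
            (PySem.Dict.mk d0))
          = (d0 ++ r.flatten).foldl step PySem.Dict.empty := by
        intro r hr
        rw [List.foldl_append, mk_eq_foldl_step d0 hd0, List.foldl_flatten]
        apply PySem.List.foldl_congr_mem
        intro acc cur hcur
        have hkeys : (PySem.Dict.mk cur).keys = cur.map Prod.fst := by
          simp [PySem.Dict.keys]
        rw [hkeys, List.foldl_map]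
        apply PySem.List.foldl_congr_mem
        intro res p hp
        have hv : (PySem.Dict.mk cur).getD p.1 0 = p.2 :=
          PySem.Dict.getD_of_mem_items (d := PySem.Dict.mk cur)
            (k := p.1) (v := p.2) (by simpa using hp)
            (by simpa [PySem.Dict.keys] using hr cur hcur) 0
        simp only [hv]
        exact guarded_step_eq res p.1 p.2
      by_cases h1 : (d0 :: rest).length = 1
      · have hrest : rest = [] := by
          cases rest with
          | nil => rfl
          | cons a t => simp at h1
        subst hrest
        simp only [merge_frequency_dict, if_pos h1]
        rw [← hcore [] (by simp)]
        rfl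
      · simp only [merge_frequency_dict, if_neg h1]
        rw [hcore rest (fun d hd => hnd d (List.mem_cons_of_mem _ hd))]
    rw [hA, foldl_step_items _ _ (by simp [pysem])]
    -- B's side
    unfold merge_frequency_dict_alt
    have hkeysB : (d0 :: rest).flatMap (fun d => (PySem.Dict.mk d).keys)
        = ((d0 ++ rest.flatten).map Prod.fst) := by
      have : (fun d : List (String × Int) => (PySem.Dict.mk d).keys)
          = fun d => d.map Prod.fst := by
        funext d; simp [PySem.Dict.keys]
      rw [this, List.flatMap_def, ← List.map_flatten, List.flatten_cons]
    rw [hkeysB]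
    have hupd : PySem.Set.update (PySem.Dict.empty (κ := String) (ν := Int)).keys
        ((d0 ++ rest.flatten).map Prod.fst)
        = PySem.List.dedup ((d0 ++ rest.flatten).map Prod.fst) := rfl
    rw [hupd]
    apply List.map_congr_left
    intro k _
    have hval : ((d0 :: rest).map (fun d => (PySem.Dict.mk d).getD k 0)).sum
        = sumAt (d0 ++ rest.flatten) k := by
      have : (d0 :: rest).map (fun d => (PySem.Dict.mk d).getD k 0)
          = (d0 :: rest).map (fun d => sumAt d k) :=
        List.map_congr_left (fun d hd => getD_eq_sumAt d (hnd d hd) k)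
      rw [this, ← sumAt_flatten, List.flatten_cons]
    rw [hval]
    simp [pysem]
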